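-- pv_equiv track=rewrite | github.com/Akylas/alpimaps_data_generator | scripts/utils/tilemask.py | _tileMaskTiles
-- ===== SOURCE A (Python) =====
-- def _buildTiles(x, y, zoom, maxZoom):
--   if zoom > maxZoom:
--     return []
--   tiles = [(x, y, zoom)]
--   tiles += _buildTiles(x * 2 + 0, y * 2 + 0, zoom + 1, maxZoom)
--   tiles += _buildTiles(x * 2 + 1, y * 2 + 0, zoom + 1, maxZoom)
--   tiles += _buildTiles(x * 2 + 0, y * 2 + 1, zoom + 1, maxZoom)
--   tiles += _buildTiles(x * 2 + 1, y * 2 + 1, zoom + 1, maxZoom)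
--   return tiles
--
-- def _tileMaskTiles(x, y, zoom, maxZoom, data):
--   submask = data.pop(0)
--   tiles = [(x, y, zoom)] if data.pop(0) else []
--   if submask:
--     tiles += _tileMaskTiles(x * 2 + 0, y * 2 + 0, zoom + 1, maxZoom, data)
--     tiles += _tileMaskTiles(x * 2 + 1, y * 2 + 0, zoom + 1, maxZoom, data)
--     tiles += _tileMaskTiles(x * 2 + 0, y * 2 + 1, zoom + 1, maxZoom, data)
--     tiles += _tileMaskTiles(x * 2 + 1, y * 2 + 1, zoom + 1, maxZoom, data)
--   elif maxZoom is not None: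
--     if maxZoom > zoom and (x, y, zoom) in tiles:
--       tiles = _buildTiles(x, y, zoom, maxZoom)
--   return tiles
-- ===== SOURCE B (Python) =====
-- def _buildTiles(x, y, zoom, maxZoom):
--     tiles = []
--     stack = [(x, y, zoom)]
--     while stack:
--         cx, cy, cz = stack.pop()
--         if cz > maxZoom:
--             continue
--         tiles.append((cx, cy, cz))
--         stack.append((cx * 2 + 1, cy * 2 + 1, cz + 1))
--         stack.append((cx * 2, cy * 2 + 1, cz + 1))
--         stack.append((cx * 2 + 1, cy * 2, cz + 1))
--         stack.append((cx * 2, cy * 2, cz + 1))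
--     return tiles
--
-- def _tileMaskTiles(x, y, zoom, maxZoom, data):
--     tiles = []
--     stack = [(x, y, zoom)]
--     while stack:
--         cx, cy, cz = stack.pop()
--         submask = data.pop(0)
--         present = data.pop(0)
--         if submask:
--             if present:
--                 tiles.append((cx, cy, cz))
--             stack.append((cx * 2 + 1, cy * 2 + 1, cz + 1))
--             stack.append((cx * 2, cy * 2 + 1, cz + 1))
--             stack.append((cx * 2 + 1, cy * 2, cz + 1))
--             stack.append((cx * 2, cy * 2, cz + 1))
--         elif present:
--             if maxZoom is not None and maxZoom > cz:
--                 tiles.extend(_buildTiles(cx, cy, cz, maxZoom))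
--             else:
--                 tiles.append((cx, cy, cz))
--     return tiles
-- ===== Notes on version B (the rewrite author's own statement) =====
-- stated objective: alternative
-- what changed: Recursion (four recursive calls per node, concatenating subtree result lists) is replaced by a single iterative loop over an explicit work-stack with one preorder output accumulator; the _buildTiles helper is likewise rewritten as a stack loop.
import Mathlib
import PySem

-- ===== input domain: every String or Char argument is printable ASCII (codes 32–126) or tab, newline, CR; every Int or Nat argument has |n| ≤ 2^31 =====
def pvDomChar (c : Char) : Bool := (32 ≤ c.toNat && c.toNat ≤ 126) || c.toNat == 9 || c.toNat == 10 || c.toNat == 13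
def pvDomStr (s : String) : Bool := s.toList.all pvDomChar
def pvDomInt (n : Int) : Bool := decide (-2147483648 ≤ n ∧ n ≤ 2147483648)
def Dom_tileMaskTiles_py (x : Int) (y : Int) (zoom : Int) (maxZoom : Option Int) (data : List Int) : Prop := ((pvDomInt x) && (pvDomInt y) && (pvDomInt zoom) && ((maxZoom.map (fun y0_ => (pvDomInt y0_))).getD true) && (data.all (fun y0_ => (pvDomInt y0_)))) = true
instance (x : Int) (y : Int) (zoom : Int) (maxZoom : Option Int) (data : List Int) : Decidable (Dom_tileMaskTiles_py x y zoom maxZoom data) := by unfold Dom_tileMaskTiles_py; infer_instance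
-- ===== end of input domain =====

-- B replaces A's recursion by an explicit work-stack DFS (same preorder output); equivalence is about the
-- RETURN value only — both Pythons consume the same prefix of `data` in place via pop(0).


-- ===== PORT A =====
-- _buildTiles (A): recursive preorder expansion
def buildTiles_py (x : Int) (y : Int) (zoom : Int) (maxZoom : Int) : List (Int × Int × Int) :=
  if zoom > maxZoom then []
  else
    (x, y, zoom) ::
      (buildTiles_py (x * 2 + 0) (y * 2 + 0) (zoom + 1) maxZoom ++
       (buildTiles_py (x * 2 + 1) (y * 2 + 0) (zoom + 1) maxZoom ++
        (buildTiles_py (x * 2 + 0) (y * 2 + 1) (zoom + 1) maxZoom ++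
         buildTiles_py (x * 2 + 1) (y * 2 + 1) (zoom + 1) maxZoom)))
termination_by (maxZoom + 1 - zoom).toNat
decreasing_by all_goals omega

-- _tileMaskTiles (A), state-passing: `data` is threaded (pop(0) = take head), `none` = IndexError
-- (pop from exhausted data); fuel := data.length + 1 only makes the recursion structural — each level
-- consumes two list elements before recursing, so fuel can never run out before `data` does.
def tileMaskGoA : Nat → Int → Int → Int → Option Int → List Int → Option (List (Int × Int × Int) × List Int)
  | _, _, _, _, _, [] => none
  | _, _, _, _, _, [_] => none
  | 0, _, _, _, _, _ :: _ :: _ => none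
  | f + 1, x, y, zoom, maxZoom, submask :: pr :: rest =>
    let tiles : List (Int × Int × Int) := if pr ≠ 0 then [(x, y, zoom)] else []
    if submask ≠ 0 then
      match tileMaskGoA f (x * 2 + 0) (y * 2 + 0) (zoom + 1) maxZoom rest with
      | none => none
      | some (t1, d1) =>
        match tileMaskGoA f (x * 2 + 1) (y * 2 + 0) (zoom + 1) maxZoom d1 with
        | none => none
        | some (t2, d2) =>
          match tileMaskGoA f (x * 2 + 0) (y * 2 + 1) (zoom + 1) maxZoom d2 with
          | none => none
          | some (t3, d3) =>
            match tileMaskGoA f (x * 2 + 1) (y * 2 + 1) (zoom + 1) maxZoom d3 with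
            | none => none
            | some (t4, d4) => some (tiles ++ (t1 ++ (t2 ++ (t3 ++ t4))), d4)
    else
      match maxZoom with
      | some mz =>
        if mz > zoom ∧ (x, y, zoom) ∈ tiles then some (buildTiles_py x y zoom mz, rest)
        else some (tiles, rest)
      | none => some (tiles, rest)

def tileMaskTiles_py (x : Int) (y : Int) (zoom : Int) (maxZoom : Option Int) (data : List Int) : List (Int × Int × Int) :=
  match tileMaskGoA (data.length + 1) x y zoom maxZoom data with
  | some (tiles, _) => tiles
  | none => []      -- unreachable under Pre_ (Python raises IndexError there)

-- ===== PORT B =====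
-- _buildTiles (B): explicit stack, head of the list = top of the stack (children pushed 11,01,10,00 so
-- they pop 00,10,01,11)
def buildTilesB (maxZoom : Int) (stack : List (Int × Int × Int)) (tiles : List (Int × Int × Int)) :
    List (Int × Int × Int) :=
  match stack with
  | [] => tiles
  | (cx, cy, cz) :: rest =>
    if cz > maxZoom then buildTilesB maxZoom rest tiles
    else
      buildTilesB maxZoom
        ((cx * 2, cy * 2, cz + 1) :: (cx * 2 + 1, cy * 2, cz + 1) ::
         (cx * 2, cy * 2 + 1, cz + 1) :: (cx * 2 + 1, cy * 2 + 1, cz + 1) :: rest)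
        (tiles ++ [(cx, cy, cz)])
termination_by (stack.map (fun t => 5 ^ ((maxZoom + 1 - t.2.2).toNat))).sum
decreasing_by
  · simp only [List.map_cons, List.sum_cons]
    have h1 : 1 ≤ 5 ^ ((maxZoom + 1 - cz).toNat) := Nat.one_le_pow _ _ (by omega)
    omega
  · simp only [List.map_cons, List.sum_cons]
    have hz : (maxZoom + 1 - cz).toNat = (maxZoom - cz).toNat + 1 := by omega
    have hc : (maxZoom + 1 - (cz + 1)).toNat = (maxZoom - cz).toNat := by omega
    have h1 : 1 ≤ 5 ^ ((maxZoom - cz).toNat) := Nat.one_le_pow _ _ (by omega)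
    rw [hz, hc, pow_succ]
    omega

-- _tileMaskTiles (B): one while-loop over the work stack; `tiles` is the output accumulator (append at
-- the end = Python list.append/extend); `none` = IndexError; fuel as in the A port.
def tileMaskGoB : Nat → Option Int → List (Int × Int × Int) → List (Int × Int × Int) → List Int →
    Option (List (Int × Int × Int) × List Int)
  | _, _, [], tiles, data => some (tiles, data)
  | _, _, _ :: _, _, [] => none
  | _, _, _ :: _, _, [_] => none
  | 0, _, _ :: _, _, _ :: _ :: _ => none
  | f + 1, maxZoom, (cx, cy, cz) :: stack, tiles, submask :: pr :: rest =>
    if submask ≠ 0 then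
      tileMaskGoB f maxZoom
        ((cx * 2, cy * 2, cz + 1) :: (cx * 2 + 1, cy * 2, cz + 1) ::
         (cx * 2, cy * 2 + 1, cz + 1) :: (cx * 2 + 1, cy * 2 + 1, cz + 1) :: stack)
        (if pr ≠ 0 then tiles ++ [(cx, cy, cz)] else tiles) rest
    else if pr ≠ 0 then
      match maxZoom with
      | some mz =>
        if mz > cz then tileMaskGoB f maxZoom stack (tiles ++ buildTilesB mz [(cx, cy, cz)] []) rest
        else tileMaskGoB f maxZoom stack (tiles ++ [(cx, cy, cz)]) rest
      | none => tileMaskGoB f maxZoom stack (tiles ++ [(cx, cy, cz)]) rest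
    else tileMaskGoB f maxZoom stack tiles rest

def tileMaskTiles_py_alt (x : Int) (y : Int) (zoom : Int) (maxZoom : Option Int) (data : List Int) :
    List (Int × Int × Int) :=
  match tileMaskGoB (data.length + 1) maxZoom [(x, y, zoom)] [] data with
  | some (tiles, _) => tiles
  | none => []      -- unreachable under Pre_

-- ===== PRECONDITION & SPEC =====
-- Pre_ excludes exactly the inputs on which Python A raises IndexError (data runs out mid-recursion):
-- `data` must start with the preorder serialization of a complete quadtree forest. pvMaskOk is the
-- standard prefix-code counter condition on `data` alone: n = trees still owed; each (submask, present)
-- pair settles one tree and, if submask is truthy, owes four more.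
def pvMaskOk : List Int → Nat → Bool
  | _, 0 => true
  | [], _ + 1 => false
  | [_], _ + 1 => false
  | s :: _ :: rest, n + 1 => pvMaskOk rest (if s ≠ 0 then n + 4 else n)

def Pre_tileMaskTiles_py (x : Int) (y : Int) (zoom : Int) (maxZoom : Option Int) (data : List Int) : Prop :=
  pvMaskOk data 1 = true
instance (x : Int) (y : Int) (zoom : Int) (maxZoom : Option Int) (data : List Int) : Decidable (Pre_tileMaskTiles_py x y zoom maxZoom data) := by unfold Pre_tileMaskTiles_py; infer_instance

def pvWitness_tileMaskTiles_py : Int × Int × Int × Option Int × List Int :=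
  (0, 0, 0, some 2, [1, 1, 0, 1, 0, 0, 0, 1, 0, 0])

def Spec_tileMaskTiles_py (x : Int) (y : Int) (zoom : Int) (maxZoom : Option Int) (data : List Int) (out : List (Int × Int × Int)) : Prop := out = tileMaskTiles_py_alt x y zoom maxZoom data
instance (x : Int) (y : Int) (zoom : Int) (maxZoom : Option Int) (data : List Int) (out : List (Int × Int × Int)) : Decidable (Spec_tileMaskTiles_py x y zoom maxZoom data out) := by unfold Spec_tileMaskTiles_py; infer_instance

-- ===== CLAIM (what is proved, stated in full; the proofs are below) =====
def Claim_equal_tileMaskTiles_py : Prop := ∀ (x : Int) (y : Int) (zoom : Int) (maxZoom : Option Int) (data : List Int), Dom_tileMaskTiles_py x y zoom maxZoom data → Pre_tileMaskTiles_py x y zoom maxZoom data → Spec_tileMaskTiles_py x y zoom maxZoom data (tileMaskTiles_py x y zoom maxZoom data)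

-- ===== LEMMAS AND PROOFS =====

theorem remA (f : Nat) : ∀ x y zoom mz d o r, tileMaskGoA f x y zoom mz d = some (o, r) → r.length + 2 ≤ d.length := by
  induction f with
  | zero =>
    intro x y zoom mz d o r h
    match d with
    | [] => simp [tileMaskGoA] at h
    | [_] => simp [tileMaskGoA] at h
    | a :: b :: rest => simp [tileMaskGoA] at h
  | succ f ih =>
    intro x y zoom mz d o r h
    match d with
    | [] => simp [tileMaskGoA] at h
    | [_] => simp [tileMaskGoA] at h
    | s :: p :: rest =>
      simp only [tileMaskGoA] at h
      split at h
      · cases h1 : tileMaskGoA f (x*2+0) (y*2+0) (zoom+1) mz rest with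
        | none => rw [h1] at h; simp at h
        | some v =>
          obtain ⟨t1, d1⟩ := v
          rw [h1] at h; dsimp only at h
          have H1 := ih _ _ _ _ _ _ _ h1
          cases h2 : tileMaskGoA f (x*2+1) (y*2+0) (zoom+1) mz d1 with
          | none => rw [h2] at h; simp at h
          | some v =>
            obtain ⟨t2, d2⟩ := v
            rw [h2] at h; dsimp only at h
            have H2 := ih _ _ _ _ _ _ _ h2
            cases h3 : tileMaskGoA f (x*2+0) (y*2+1) (zoom+1) mz d2 with
            | none => rw [h3] at h; simp at h
            | some v =>
              obtain ⟨t3, d3⟩ := v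
              rw [h3] at h; dsimp only at h
              have H3 := ih _ _ _ _ _ _ _ h3
              cases h4 : tileMaskGoA f (x*2+1) (y*2+1) (zoom+1) mz d3 with
              | none => rw [h4] at h; simp at h
              | some v =>
                obtain ⟨t4, d4⟩ := v
                rw [h4] at h; dsimp only at h
                have H4 := ih _ _ _ _ _ _ _ h4
                simp only [Option.some.injEq, Prod.mk.injEq] at h
                obtain ⟨-, h2'⟩ := h
                subst h2'
                simp at H1 H2 H3 H4 ⊢
                omega
      · split at h <;> split_ifs at h <;>
          (simp only [Option.some.injEq, Prod.mk.injEq] at h; obtain ⟨-, h2x⟩ := h; subst h2x;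
           simp only [List.length_cons]; omega)

theorem monoB (f : Nat) : ∀ f' mz stack tiles d, d.length < f → d.length < f' →
    tileMaskGoB f mz stack tiles d = tileMaskGoB f' mz stack tiles d := by
  induction f with
  | zero => intro f' mz stack tiles d h _; exact absurd h (by omega)
  | succ fa ih =>
    intro f' mz stack tiles d h h'
    match stack, d with
    | [], _ => match f' with | 0 => rfl | _ + 1 => rfl
    | _ :: _, [] => match f' with | 0 => rfl | _ + 1 => rfl
    | _ :: _, [_] => match f' with | 0 => rfl | _ + 1 => rfl
    | (cx, cy, cz) :: stk, s :: p :: rest =>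
      match f' with
      | 0 => exact absurd h' (by simp at h')
      | fb + 1 =>
        simp only [List.length_cons] at h h'
        simp only [tileMaskGoB]
        by_cases hs : s ≠ 0
        · simp only [if_pos hs]; exact ih fb mz _ _ rest (by omega) (by omega)
        · simp only [if_neg hs]
          by_cases hp : p ≠ 0
          · simp only [if_pos hp]
            cases mz with
            | some m =>
              by_cases hm : m > cz
              · simp only [if_pos hm]; exact ih fb _ _ _ rest (by omega) (by omega)
              · simp only [if_neg hm]; exact ih fb _ _ _ rest (by omega) (by omega)
            | none => exact ih fb _ _ _ rest (by omega) (by omega)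
          · simp only [if_neg hp]; exact ih fb _ _ _ rest (by omega) (by omega)

theorem buildB_sim (mz : Int) : ∀ n z, (mz + 1 - z).toNat ≤ n → ∀ x y rest tiles,
    buildTilesB mz ((x, y, z) :: rest) tiles = buildTilesB mz rest (tiles ++ buildTiles_py x y z mz) := by
  intro n
  induction n with
  | zero =>
    intro z hz x y rest tiles
    have hz' : z > mz := by omega
    rw [buildTilesB, buildTiles_py]
    simp [hz']
  | succ n ih =>
    intro z hz x y rest tiles
    by_cases hgt : z > mz
    · rw [buildTilesB, buildTiles_py]
      simp [hgt]
    · have hch : (mz + 1 - (z + 1)).toNat ≤ n := by omega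
      rw [buildTilesB, buildTiles_py]
      simp only [if_neg hgt]
      rw [ih _ hch, ih _ hch, ih _ hch, ih _ hch]
      simp [List.append_assoc]

theorem buildB_one (mz x y z : Int) :
    buildTilesB mz [(x, y, z)] [] = buildTiles_py x y z mz := by
  rw [buildB_sim mz ((mz + 1 - z).toNat) z (le_refl _)]
  rw [buildTilesB]
  simp

theorem simBA (f : Nat) : ∀ mz x y z stack tiles d, d.length < f →
    tileMaskGoB f mz ((x, y, z) :: stack) tiles d =
      match tileMaskGoA f x y z mz d with
      | none => none
      | some (o, d') => tileMaskGoB (d'.length + 1) mz stack (tiles ++ o) d' := by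
  induction f with
  | zero => intro mz x y z stack tiles d h; exact absurd h (by omega)
  | succ fa ih =>
    intro mz x y z stack tiles d h
    match d with
    | [] => rfl
    | [_] => rfl
    | s :: p :: rest =>
      simp only [List.length_cons] at h
      simp only [tileMaskGoA, tileMaskGoB, add_zero]
      by_cases hs : s ≠ 0
      · simp only [if_pos hs]
        rw [ih mz (x*2) (y*2) (z+1) _ _ rest (by omega)]
        cases g1 : tileMaskGoA fa (x*2) (y*2) (z+1) mz rest with
        | none => rfl
        | some v =>
          obtain ⟨t1, d1⟩ := v
          dsimp only
          have r1 := remA fa _ _ _ _ _ _ _ g1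
          rw [monoB (d1.length + 1) fa mz _ _ d1 (by omega) (by omega)]
          rw [ih mz (x*2+1) (y*2) (z+1) _ _ d1 (by omega)]
          cases g2 : tileMaskGoA fa (x*2+1) (y*2) (z+1) mz d1 with
          | none => rfl
          | some v =>
            obtain ⟨t2, d2⟩ := v
            dsimp only
            have r2 := remA fa _ _ _ _ _ _ _ g2
            rw [monoB (d2.length + 1) fa mz _ _ d2 (by omega) (by omega)]
            rw [ih mz (x*2) (y*2+1) (z+1) _ _ d2 (by omega)]
            cases g3 : tileMaskGoA fa (x*2) (y*2+1) (z+1) mz d2 with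
            | none => rfl
            | some v =>
              obtain ⟨t3, d3⟩ := v
              dsimp only
              have r3 := remA fa _ _ _ _ _ _ _ g3
              rw [monoB (d3.length + 1) fa mz _ _ d3 (by omega) (by omega)]
              rw [ih mz (x*2+1) (y*2+1) (z+1) _ _ d3 (by omega)]
              cases g4 : tileMaskGoA fa (x*2+1) (y*2+1) (z+1) mz d3 with
              | none => rfl
              | some v =>
                obtain ⟨t4, d4⟩ := v
                dsimp only
                by_cases hp : p ≠ 0
                · simp [hp, List.append_assoc]
                · simp [hp, List.append_assoc]
      · simp only [if_neg hs]
        by_cases hp : p ≠ 0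
        · simp only [if_pos hp]
          cases mz with
          | some m =>
            dsimp only
            by_cases hm : m > z
            · rw [if_pos (show m > z ∧ (x, y, z) ∈ [(x, y, z)] by simp [hm])]
              rw [buildB_one, if_pos hm]
              exact monoB fa (rest.length + 1) (some m) _ _ rest (by omega) (by omega)
            · rw [if_neg (show ¬(m > z ∧ (x, y, z) ∈ [(x, y, z)]) by simp [hm]), if_neg hm]
              exact monoB fa (rest.length + 1) (some m) _ _ rest (by omega) (by omega)
          | none =>
            dsimp only
            exact monoB fa (rest.length + 1) none _ _ rest (by omega) (by omega)
        · simp only [if_neg hp]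
          cases mz with
          | some m =>
            dsimp only
            rw [if_neg (show ¬(m > z ∧ (x, y, z) ∈ ([] : List (Int × Int × Int))) by simp)]
            simp only [List.append_nil]
            exact monoB fa (rest.length + 1) (some m) _ _ rest (by omega) (by omega)
          | none =>
            dsimp only
            simp only [List.append_nil]
            exact monoB fa (rest.length + 1) none _ _ rest (by omega) (by omega)

-- ===== VERDICT (by name: the statement is the Claim_ definition above) =====
theorem tileMaskTiles_py_spec : Claim_equal_tileMaskTiles_py := by
  intro x y zoom maxZoom data _ _
  unfold Spec_tileMaskTiles_py tileMaskTiles_py tileMaskTiles_py_alt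
  rw [simBA (data.length + 1) maxZoom x y zoom [] [] data (by omega)]
  cases g : tileMaskGoA (data.length + 1) x y zoom maxZoom data with
  | none => rfl
  | some v =>
    obtain ⟨o, d'⟩ := v
    dsimp only
    rw [show tileMaskGoB (d'.length + 1) maxZoom [] ([] ++ o) d' = some ([] ++ o, d') from rfl]
    simp
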